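-- pv_equiv track=rewrite | github.com/google-research/language | language/nqg/model/induction/rule_utils.py | rhs_replace
-- ===== SOURCE A (Python) =====
-- def rhs_replace(rhs, sublist, replacement):
--   """Replace occurrences of sublist in rhs with replacement."""
--   sublist = tuple(sublist)
--   rhs = tuple(rhs)
--   if len(sublist) > len(rhs):
--     raise ValueError
--   if not sublist:
--     raise ValueError
--   new_list = []
--   idx = 0
--   while idx < len(rhs):
--     if rhs[idx:idx + len(sublist)] == sublist:
--       new_list.append(replacement)
--       idx += len(sublist)
--     else:
--       new_list.append(rhs[idx])
--       idx += 1
--   return tuple(new_list)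
-- ===== SOURCE B (Python) =====
-- def _find(seq, sub, start):
--   """First index j >= start where sub occurs in seq, or -1."""
--   m = len(sub)
--   for j in range(start, len(seq) - m + 1):
--     if seq[j:j + m] == sub:
--       return j
--   return -1
--
--
-- def rhs_replace(rhs, sublist, replacement):
--   """Replace occurrences of sublist in rhs with replacement."""
--   sub = tuple(sublist)
--   seq = tuple(rhs)
--   if len(sub) > len(seq):
--     raise ValueError
--   if not sub:
--     raise ValueError
--   m = len(sub)
--   out = []
--   start = 0
--   while True:
--     j = _find(seq, sub, start)
--     if j < 0:
--       out.extend(seq[start:])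
--       return tuple(out)
--     out.extend(seq[start:j])
--     out.append(replacement)
--     start = j + m
-- ===== Notes on version B (the rewrite author's own statement) =====
-- stated objective: faster
-- what changed: B replaces A's element-by-element while loop (a slice comparison and an append at every index) by a find-and-stitch scheme: a helper locates the next occurrence of the sublist, only scanning candidate positions up to len-m+1, and B copies the whole untouched segments between occurrences with slice/extend at C speed.
import Mathlib
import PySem

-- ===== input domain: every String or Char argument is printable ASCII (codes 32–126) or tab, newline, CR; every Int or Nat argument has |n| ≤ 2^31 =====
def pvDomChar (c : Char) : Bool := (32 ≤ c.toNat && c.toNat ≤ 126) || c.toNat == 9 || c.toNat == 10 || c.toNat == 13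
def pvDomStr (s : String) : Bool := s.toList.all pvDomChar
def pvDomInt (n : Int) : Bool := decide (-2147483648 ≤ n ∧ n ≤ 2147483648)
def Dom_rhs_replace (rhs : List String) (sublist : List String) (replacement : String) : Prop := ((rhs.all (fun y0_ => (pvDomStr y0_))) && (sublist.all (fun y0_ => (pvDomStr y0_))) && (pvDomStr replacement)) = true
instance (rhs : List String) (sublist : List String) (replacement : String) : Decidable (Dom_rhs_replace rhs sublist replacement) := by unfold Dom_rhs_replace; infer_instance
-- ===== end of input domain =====

-- B replaces A's element-by-element while loop by find-next-occurrence + copy whole untouched segments (objective: faster; a timing run measured B well over 1.5x faster at the largest size).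

-- ===== PORT A =====
-- A's while loop: one append per position. The fuel argument is only a totality guard:
-- the top level passes rhs.length, which suffices because the loop is only entered when
-- sublist is nonempty, so idx advances by at least 1 per iteration.
def rhsLoopA (rhs : List String) (sublist : List String) (repl : String) :
    Nat → Nat → List String → List String
  | 0, _, acc => acc
  | fuel + 1, idx, acc =>
    if h : idx < rhs.length then
      if PySem.List.slice rhs (some (idx : Int)) (some ((idx : Int) + (sublist.length : Int))) = sublist then
        rhsLoopA rhs sublist repl fuel (idx + sublist.length) (acc ++ [repl])
      else
        rhsLoopA rhs sublist repl fuel (idx + 1) (acc ++ [rhs[idx]])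
    else acc

def rhs_replace (rhs : List String) (sublist : List String) (replacement : String) : List String :=
  if sublist.length > rhs.length then []        -- A raises ValueError (outside Pre_)
  else if 0 < sublist.length then
    rhsLoopA rhs sublist replacement rhs.length 0 []
  else []                                        -- A raises ValueError (outside Pre_)

-- ===== PORT B =====
-- B's _find: first j ≥ start with an occurrence (Option Nat renders Python's -1 sentinel).
-- seq[j:j+m] == sub is exactly isPrefixOf on the drop, because the range bound gives j+m ≤ len.
-- Fuel rhs.length + 1 covers every candidate position.
def findB (rhs : List String) (sublist : List String) : Nat → Nat → Option Nat
  | 0, _ => none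
  | fuel + 1, start =>
    if start + sublist.length ≤ rhs.length then
      if sublist.isPrefixOf (rhs.drop start) then some start
      else findB rhs sublist fuel (start + 1)
    else none

-- B's stitching loop: copy the untouched segment up to the next occurrence, emit repl, jump past it.
-- Fuel rhs.length + 1 suffices: each found occurrence moves start forward by at least 1.
def rhsLoopB (rhs : List String) (sublist : List String) (repl : String) :
    Nat → Nat → List String → List String
  | 0, _, acc => acc
  | fuel + 1, start, acc =>
    match findB rhs sublist (rhs.length + 1) start with
    | none => acc ++ rhs.drop start
    | some j =>
        rhsLoopB rhs sublist repl fuel (j + sublist.length)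
          (acc ++ (rhs.drop start).take (j - start) ++ [repl])

def rhs_replace_alt (rhs : List String) (sublist : List String) (replacement : String) : List String :=
  if sublist.length > rhs.length then []        -- B raises ValueError (outside Pre_)
  else if 0 < sublist.length then
    rhsLoopB rhs sublist replacement (rhs.length + 1) 0 []
  else []                                        -- B raises ValueError (outside Pre_)

-- ===== PRECONDITION & SPEC =====
-- A raises ValueError exactly when sublist is empty or longer than rhs; Pre_ excludes those.
def Pre_rhs_replace (rhs : List String) (sublist : List String) (replacement : String) : Prop :=
  sublist ≠ [] ∧ sublist.length ≤ rhs.length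
instance (rhs : List String) (sublist : List String) (replacement : String) : Decidable (Pre_rhs_replace rhs sublist replacement) := by unfold Pre_rhs_replace; infer_instance

def pvWitness_rhs_replace : List String × List String × String := (["a", "b", "a"], ["a"], "x")

def Spec_rhs_replace (rhs : List String) (sublist : List String) (replacement : String) (out : List String) : Prop := out = rhs_replace_alt rhs sublist replacement
instance (rhs : List String) (sublist : List String) (replacement : String) (out : List String) : Decidable (Spec_rhs_replace rhs sublist replacement out) := by unfold Spec_rhs_replace; infer_instance

-- ===== CLAIM (what is proved, stated in full; the proofs are below) =====
def Claim_equal_rhs_replace : Prop := ∀ (rhs : List String) (sublist : List String) (replacement : String), Dom_rhs_replace rhs sublist replacement → Pre_rhs_replace rhs sublist replacement → Spec_rhs_replace rhs sublist replacement (rhs_replace rhs sublist replacement)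

-- ===== LEMMAS AND PROOFS =====

-- A's slice test rhs[idx:idx+m] == sublist, characterised (needs 0 < m).
theorem slice_test_iff (rhs sublist : List String) (idx : Nat) (hm : 0 < sublist.length) :
    (PySem.List.slice rhs (some (idx : Int)) (some ((idx : Int) + (sublist.length : Int))) = sublist)
      ↔ (idx + sublist.length ≤ rhs.length ∧ sublist.isPrefixOf (rhs.drop idx)) := by
  rw [PySem.List.slice_natCast_add]
  constructor
  · intro h
    have hlen : ((rhs.drop idx).take sublist.length).length = sublist.length := by rw [h]
    simp [List.length_take, List.length_drop] at hlen
    refine ⟨by omega, ?_⟩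
    rw [List.isPrefixOf_iff_prefix]
    exact List.prefix_iff_eq_take.mpr h.symm
  · rintro ⟨hle, hpre⟩
    rw [List.isPrefixOf_iff_prefix] at hpre
    exact (List.prefix_iff_eq_take.mp hpre).symm

-- When the loop index is already past the end, A's loop returns the accumulator whatever the fuel.
theorem loopA_idle (rhs sublist : List String) (repl : String) (fuel idx : Nat) (acc : List String)
    (h : rhs.length ≤ idx) : rhsLoopA rhs sublist repl fuel idx acc = acc := by
  cases fuel with
  | zero => rfl
  | succ f => rw [rhsLoopA, dif_neg (by omega)]

-- Past the last position where the pattern could fit, A's loop just copies the rest.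
theorem loopA_tail (rhs sublist : List String) (repl : String) (hm : 0 < sublist.length) :
    ∀ fuel idx acc, rhs.length ≤ fuel + idx → rhs.length < idx + sublist.length →
      rhsLoopA rhs sublist repl fuel idx acc = acc ++ rhs.drop idx := by
  intro fuel
  induction fuel with
  | zero =>
    intro idx acc hfuel _
    rw [loopA_idle rhs sublist repl 0 idx acc (by omega),
      List.drop_of_length_le (by omega), List.append_nil]
  | succ f ih =>
    intro idx acc hfuel hgt
    by_cases hidx : idx < rhs.length
    · rw [rhsLoopA, dif_pos hidx,
        if_neg (by rw [slice_test_iff rhs sublist idx hm]; omega),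
        ih (idx + 1) (acc ++ [rhs[idx]]) (by omega) (by omega),
        List.drop_eq_getElem_cons hidx]
      simp
    · rw [rhsLoopA, dif_neg hidx, List.drop_of_length_le (by omega), List.append_nil]

-- findB returns an index at or after start where the pattern fits.
theorem findB_bounds (rhs sublist : List String) :
    ∀ ffind start j, findB rhs sublist ffind start = some j →
      start ≤ j ∧ j + sublist.length ≤ rhs.length := by
  intro ffind
  induction ffind with
  | zero => intro start j h; cases h
  | succ f ih =>
    intro start j h
    rw [findB] at h
    by_cases h1 : start + sublist.length ≤ rhs.length
    · rw [if_pos h1] at h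
      by_cases h2 : sublist.isPrefixOf (rhs.drop start)
      · rw [if_pos h2] at h; cases h; omega
      · rw [if_neg h2] at h; have := ih (start + 1) j h; omega
    · rw [if_neg h1] at h; cases h

-- If there is no occurrence at or after start, A's loop just copies the rest.
theorem loopA_none (rhs sublist : List String) (repl : String) (hm : 0 < sublist.length) :
    ∀ ffind start acc fuel, rhs.length + 1 ≤ ffind + start → rhs.length ≤ fuel + start →
      findB rhs sublist ffind start = none →
      rhsLoopA rhs sublist repl fuel start acc = acc ++ rhs.drop start := by
  intro ffind
  induction ffind with
  | zero =>
    intro start acc fuel hff _ _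
    rw [loopA_idle rhs sublist repl fuel start acc (by omega),
      List.drop_of_length_le (by omega), List.append_nil]
  | succ f ih =>
    intro start acc fuel hff hfuel hnone
    rw [findB] at hnone
    by_cases h1 : start + sublist.length ≤ rhs.length
    · rw [if_pos h1] at hnone
      by_cases h2 : sublist.isPrefixOf (rhs.drop start)
      · rw [if_pos h2] at hnone; cases hnone
      · rw [if_neg h2] at hnone
        have hidx : start < rhs.length := by omega
        obtain ⟨g, rfl⟩ : ∃ g, fuel = g + 1 :=
          ⟨fuel - 1, by omega⟩
        rw [rhsLoopA, dif_pos hidx,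
          if_neg (by rw [slice_test_iff rhs sublist start hm]; exact fun hc => h2 hc.2),
          ih (start + 1) (acc ++ [rhs[start]]) g (by omega) (by omega) hnone,
          List.drop_eq_getElem_cons hidx]
        simp
    · by_cases hidx : start < rhs.length
      · exact loopA_tail rhs sublist repl hm fuel start acc hfuel (by omega)
      · rw [loopA_idle rhs sublist repl fuel start acc (by omega),
          List.drop_of_length_le (by omega), List.append_nil]

-- If the next occurrence is at j, A's loop walks to j copying elements, emits repl, and resumes at j+m.
theorem loopA_some (rhs sublist : List String) (repl : String) (hm : 0 < sublist.length) :
    ∀ ffind start j acc fuel, rhs.length ≤ fuel + start →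
      findB rhs sublist ffind start = some j →
      rhsLoopA rhs sublist repl fuel start acc
        = rhsLoopA rhs sublist repl (fuel - (j - start) - 1) (j + sublist.length)
            (acc ++ (rhs.drop start).take (j - start) ++ [repl]) := by
  intro ffind
  induction ffind with
  | zero => intro start j acc fuel _ h; cases h
  | succ f ih =>
    intro start j acc fuel hfuel hsome
    rw [findB] at hsome
    by_cases h1 : start + sublist.length ≤ rhs.length
    · rw [if_pos h1] at hsome
      have hidx : start < rhs.length := by omega
      obtain ⟨g, rfl⟩ : ∃ g, fuel = g + 1 := ⟨fuel - 1, by omega⟩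
      by_cases h2 : sublist.isPrefixOf (rhs.drop start)
      · rw [if_pos h2] at hsome
        cases hsome
        rw [rhsLoopA, dif_pos hidx,
          if_pos ((slice_test_iff rhs sublist start hm).mpr ⟨h1, h2⟩)]
        simp
      · rw [if_neg h2] at hsome
        have hb := findB_bounds rhs sublist f (start + 1) j hsome
        rw [rhsLoopA, dif_pos hidx,
          if_neg (by rw [slice_test_iff rhs sublist start hm]; exact fun hc => h2 hc.2),
          ih (start + 1) j (acc ++ [rhs[start]]) g (by omega) hsome]
        have hfa : g - (j - (start + 1)) - 1 = g + 1 - (j - start) - 1 := by omega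
        rw [hfa, List.drop_eq_getElem_cons hidx]
        have hts : j - start = (j - (start + 1)) + 1 := by omega
        rw [hts, List.take_succ_cons]
        simp
    · rw [if_neg h1] at hsome; cases hsome

-- Main loop equivalence: A's walk equals B's find-and-stitch.
theorem loop_eq (rhs sublist : List String) (repl : String) (hm : 0 < sublist.length) :
    ∀ fuelB start acc fuelA, rhs.length + 1 ≤ fuelB + start → rhs.length ≤ fuelA + start →
      rhsLoopA rhs sublist repl fuelA start acc = rhsLoopB rhs sublist repl fuelB start acc := by
  intro fuelB
  induction fuelB with
  | zero =>
    intro start acc fuelA hB _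
    rw [loopA_idle rhs sublist repl fuelA start acc (by omega)]
    rfl
  | succ f ih =>
    intro start acc fuelA hB hA
    rw [rhsLoopB]
    cases hf : findB rhs sublist (rhs.length + 1) start with
    | none =>
      exact loopA_none rhs sublist repl hm (rhs.length + 1) start acc fuelA (by omega) hA hf
    | some j =>
      have hb := findB_bounds rhs sublist (rhs.length + 1) start j hf
      rw [loopA_some rhs sublist repl hm (rhs.length + 1) start j acc fuelA hA hf]
      exact ih (j + sublist.length)
        (acc ++ (rhs.drop start).take (j - start) ++ [repl])
        (fuelA - (j - start) - 1) (by omega) (by omega)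

-- ===== VERDICT (by name: the statement is the Claim_ definition above) =====
theorem rhs_replace_spec : Claim_equal_rhs_replace := by
  intro rhs sublist replacement _ hpre
  obtain ⟨hne, hle⟩ := hpre
  have hm : 0 < sublist.length := List.length_pos_iff.mpr hne
  unfold Spec_rhs_replace rhs_replace rhs_replace_alt
  rw [if_neg (by omega), if_pos hm, if_neg (by omega), if_pos hm]
  exact loop_eq rhs sublist replacement hm (rhs.length + 1) 0 [] rhs.length (by omega) (by omega)
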